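-- pv_equiv track=rewrite | github.com/rarvind2312/IPLPredictor | h2h_history.py | row_team_names_pair
-- ===== SOURCE A (Python) =====
-- from typing import Any, Optional
--
-- _TEAM_PAIR_COLUMN_KEYS: tuple[tuple[str, str], ...] = (
--     ("team_a", "team_b"),
--     ("team1", "team2"),
--     ("home_team", "away_team"),
--     ("team_a_name", "team_b_name"),
--     ("home_team_name", "away_team_name"),
--     ("team_home", "team_away"),
--     ("side_1_team", "side_2_team"),
--     ("homeTeam", "awayTeam"),
-- )
--
-- def row_team_names_pair(row: dict[str, Any]) -> tuple[str, str]: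
--     """
--     Extract the two opponent team name fields from a match / meta row.
--
--     Does not assume only ``team_a`` / ``team_b`` — supports alternate schemas and
--     passes through any extra keys present on ``row`` (e.g. after ``SELECT *``).
--     """
--     for k1, k2 in _TEAM_PAIR_COLUMN_KEYS:
--         v1 = str(row.get(k1) or "").strip()
--         v2 = str(row.get(k2) or "").strip()
--         if v1 and v2:
--             return v1, v2
--     for k1, k2 in _TEAM_PAIR_COLUMN_KEYS:
--         v1 = str(row.get(k1) or "").strip()
--         v2 = str(row.get(k2) or "").strip()
--         if v1 or v2:
--             return v1, v2
--     # Last resort: any two distinct non-empty string columns whose names suggest a side team.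
--     _skip_keys = frozenset(
--         {
--             "winner",
--             "batting_first",
--             "venue",
--             "match_date",
--             "created_at",
--             "id",
--             "match_id",
--         }
--     )
--     found: list[tuple[str, str]] = []
--     for k in sorted(row.keys(), key=lambda x: str(x).lower()):
--         if k in _skip_keys or str(k).lower() in _skip_keys:
--             continue
--         lk = str(k).lower()
--         if "team" not in lk:
--             continue
--         v = row.get(k)
--         if v is None:
--             continue
--         s = str(v).strip()
--         if len(s) < 2:
--             continue
--         found.append((str(k), s))
--     if len(found) >= 2:
--         return found[0][1], found[1][1]
--     return "", ""
-- ===== SOURCE B (Python) =====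
-- _TEAM_PAIR_COLUMN_KEYS: tuple[tuple[str, str], ...] = (
--     ("team_a", "team_b"),
--     ("team1", "team2"),
--     ("home_team", "away_team"),
--     ("team_a_name", "team_b_name"),
--     ("home_team_name", "away_team_name"),
--     ("team_home", "team_away"),
--     ("side_1_team", "side_2_team"),
--     ("homeTeam", "awayTeam"),
-- )
--
-- _SKIP_KEYS = frozenset(
--     {"winner", "batting_first", "venue", "match_date", "created_at", "id", "match_id"}
-- )
--
--
-- def row_team_names_pair(row):
--     # One pass over the key-pair table: a both-present pair wins immediately,
--     # the first either-present pair is kept as a fallback.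
--     fallback = None
--     for k1, k2 in _TEAM_PAIR_COLUMN_KEYS:
--         v1 = str(row.get(k1) or "").strip()
--         v2 = str(row.get(k2) or "").strip()
--         if v1 and v2:
--             return v1, v2
--         if (v1 or v2) and fallback is None:
--             fallback = (v1, v2)
--     if fallback is not None:
--         return fallback
--
--     # Last resort: pick the values of team-ish columns, keys sorted case-insensitively.
--     def _pick(k):
--         v = row.get(k)
--         if v is None:
--             return None
--         lk = str(k).lower()
--         if lk not in _SKIP_KEYS and "team" in lk:
--             s = str(v).strip()
--             if len(s) >= 2:
--                 return s
--         return None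
--
--     found = [s for s in map(_pick, sorted(row, key=lambda x: str(x).lower())) if s is not None]
--     if len(found) >= 2:
--         return found[0], found[1]
--     return "", ""
-- ===== Notes on version B (the rewrite author's own statement) =====
-- stated objective: simpler
-- what changed: B collapses A's two sequential scans over the key-pair table into a single pass (first both-present pair returns immediately, first either-present pair is recorded once as a fallback) and replaces the last-resort accumulate-then-index loop by a filter over the sorted keys whose first two hits are returned.
import Mathlib
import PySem

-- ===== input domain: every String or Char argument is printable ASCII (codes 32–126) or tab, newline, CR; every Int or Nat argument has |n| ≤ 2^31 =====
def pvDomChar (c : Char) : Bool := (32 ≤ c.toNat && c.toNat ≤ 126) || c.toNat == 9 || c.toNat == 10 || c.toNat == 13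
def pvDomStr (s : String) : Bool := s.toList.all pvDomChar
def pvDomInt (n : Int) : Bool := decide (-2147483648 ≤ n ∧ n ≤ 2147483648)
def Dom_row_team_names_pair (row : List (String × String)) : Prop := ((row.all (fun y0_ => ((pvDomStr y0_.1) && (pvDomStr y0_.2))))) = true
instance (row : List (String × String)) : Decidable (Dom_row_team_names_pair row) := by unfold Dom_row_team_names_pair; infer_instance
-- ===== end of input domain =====

-- B does the same extraction in one pass over the key-pair table (immediate return on a
-- both-present pair, first either-present pair kept as fallback) and filters the sorted
-- keys for the last resort instead of accumulating then indexing; objective: simpler.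


-- ===== PORT A =====
def pvKeyPairs : List (String × String) :=
  [("team_a", "team_b"), ("team1", "team2"), ("home_team", "away_team"),
   ("team_a_name", "team_b_name"), ("home_team_name", "away_team_name"),
   ("team_home", "team_away"), ("side_1_team", "side_2_team"), ("homeTeam", "awayTeam")]

def pvSkip : List String :=
  ["winner", "batting_first", "venue", "match_date", "created_at", "id", "match_id"]

-- str(row.get(k) or "").strip(): None and "" both fall to "", values are strings
def pvGetStr (d : PySem.Dict String String) (k : String) : String :=
  PySem.Str.strip ((d.get? k).getD "")

-- A's first loop: first pair with BOTH fields non-empty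
def pvFindBoth (d : PySem.Dict String String) : List (String × String) → Option (String × String)
  | [] => none
  | (k1, k2) :: rest =>
      let v1 := pvGetStr d k1
      let v2 := pvGetStr d k2
      if v1 ≠ "" ∧ v2 ≠ "" then some (v1, v2) else pvFindBoth d rest

-- A's second loop: first pair with EITHER field non-empty
def pvFindEither (d : PySem.Dict String String) : List (String × String) → Option (String × String)
  | [] => none
  | (k1, k2) :: rest =>
      let v1 := pvGetStr d k1
      let v2 := pvGetStr d k2
      if v1 ≠ "" ∨ v2 ≠ "" then some (v1, v2) else pvFindEither d rest

-- one iteration of A's last-resort loop (continue = return acc unchanged)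
def pvStepA (d : PySem.Dict String String) (acc : List (String × String)) (k : String) :
    List (String × String) :=
  if k ∈ pvSkip ∨ PySem.Str.lower k ∈ pvSkip then acc
  else if ¬ (PySem.Str.isIn "team" (PySem.Str.lower k) = true) then acc
  else
    match d.get? k with
    | none => acc
    | some v =>
        let s := PySem.Str.strip v
        if PySem.Str.len s < 2 then acc else acc ++ [(k, s)]

def pvLastA (d : PySem.Dict String String) : String × String :=
  let found := (PySem.List.sorted d.keys (fun x => PySem.Str.lower x) false).foldl (pvStepA d) []
  if 2 ≤ found.length then ((found.getD 0 ("", "")).2, (found.getD 1 ("", "")).2)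
  else ("", "")

def row_team_names_pair (row : List (String × String)) : String × String :=
  match pvFindBoth (PySem.Dict.ofList row) pvKeyPairs with
  | some p => p
  | none =>
      match pvFindEither (PySem.Dict.ofList row) pvKeyPairs with
      | some p => p
      | none => pvLastA (PySem.Dict.ofList row)

-- ===== PORT B =====
-- B's single pass: return on a both-present pair, record the first either-present pair
def pvScanB (d : PySem.Dict String String) :
    List (String × String) → Option (String × String) → Option (String × String)
  | [], fb => fb
  | (k1, k2) :: rest, fb =>
      let v1 := pvGetStr d k1
      let v2 := pvGetStr d k2
      if v1 ≠ "" ∧ v2 ≠ "" then some (v1, v2)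
      else pvScanB d rest (if (v1 ≠ "" ∨ v2 ≠ "") ∧ fb = none then some (v1, v2) else fb)

-- B's _pick
def pvPickB (d : PySem.Dict String String) (k : String) : Option String :=
  match d.get? k with
  | none => none
  | some v =>
      if PySem.Str.lower k ∉ pvSkip ∧ PySem.Str.isIn "team" (PySem.Str.lower k) = true ∧
          2 ≤ PySem.Str.len (PySem.Str.strip v)
      then some (PySem.Str.strip v) else none

def pvLastB (d : PySem.Dict String String) : String × String :=
  match (PySem.List.sorted d.keys (fun x => PySem.Str.lower x) false).filterMap (pvPickB d) with
  | a :: b :: _ => (a, b)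
  | _ => ("", "")

def row_team_names_pair_alt (row : List (String × String)) : String × String :=
  match pvScanB (PySem.Dict.ofList row) pvKeyPairs none with
  | some p => p
  | none => pvLastB (PySem.Dict.ofList row)

-- ===== PRECONDITION & SPEC =====
def Spec_row_team_names_pair (row : List (String × String)) (out : String × String) : Prop := out = row_team_names_pair_alt row
instance (row : List (String × String)) (out : String × String) : Decidable (Spec_row_team_names_pair row out) := by unfold Spec_row_team_names_pair; infer_instance

-- ===== CLAIM (what is proved, stated in full; the proofs are below) =====
def Claim_equal_row_team_names_pair : Prop := ∀ (row : List (String × String)), Dom_row_team_names_pair row → Spec_row_team_names_pair row (row_team_names_pair row)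

-- ===== LEMMAS AND PROOFS =====

-- the single pass equals "first both-pair, else fallback, else first either-pair"
theorem pvScanB_spec (d : PySem.Dict String String) (pairs : List (String × String)) :
    ∀ fb : Option (String × String),
      pvScanB d pairs fb =
        match pvFindBoth d pairs with
        | some p => some p
        | none => match fb with
          | some f => some f
          | none => pvFindEither d pairs := by
  induction pairs with
  | nil => intro fb; cases fb <;> rfl
  | cons hd rest ih =>
      intro fb
      obtain ⟨k1, k2⟩ := hd
      simp only [pvScanB, pvFindBoth, pvFindEither]
      by_cases hb : pvGetStr d k1 ≠ "" ∧ pvGetStr d k2 ≠ ""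
      · simp [hb]
      · simp only [hb, if_false, ih]
        by_cases he : pvGetStr d k1 ≠ "" ∨ pvGetStr d k2 ≠ ""
        · cases fb <;> simp [he]
        · cases fb <;> simp [he]

theorem lower_mem_skip_of_mem (k : String) (h : k ∈ pvSkip) : PySem.Str.lower k ∈ pvSkip := by
  fin_cases h <;> decide

-- A's loop body = append of B's pick (paired with its key)
theorem pvStepA_eq (d : PySem.Dict String String) (acc : List (String × String)) (k : String) :
    pvStepA d acc k = acc ++ ((pvPickB d k).map (fun s => (k, s))).toList := by
  unfold pvStepA pvPickB
  by_cases hs : k ∈ pvSkip ∨ PySem.Str.lower k ∈ pvSkip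
  · have hls : PySem.Str.lower k ∈ pvSkip := by
      rcases hs with h | h
      · exact lower_mem_skip_of_mem k h
      · exact h
    simp only [hs, if_true]
    cases d.get? k with
    | none => simp
    | some v => simp [hls]
  · have hls : PySem.Str.lower k ∉ pvSkip := fun h => hs (Or.inr h)
    rw [if_neg hs]
    by_cases ht : PySem.Str.isIn "team" (PySem.Str.lower k) = true
    · rw [if_neg (not_not_intro ht)]
      cases d.get? k with
      | none => simp
      | some v =>
          simp only [PySem.Str.len_eq, PySem.Str.isIn_eq, PySem.Str.toList_strip,
            PySem.Str.toList_lower] at ht ⊢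
          split_ifs <;> simp_all <;> omega
    · rw [if_pos ht]
      cases d.get? k with
      | none => simp
      | some v =>
          have ht' : ¬ PySem.Chars.isIn ['t', 'e', 'a', 'm'] (PySem.Chars.lower k.toList) = true := by
            simpa using ht
          simp [ht']

theorem foldl_stepA_eq (d : PySem.Dict String String) (l : List String) :
    ∀ acc, l.foldl (pvStepA d) acc =
      acc ++ l.filterMap (fun k => (pvPickB d k).map (fun s => (k, s))) := by
  induction l with
  | nil => intro acc; simp
  | cons k rest ih =>
      intro acc
      simp only [List.foldl_cons, List.filterMap_cons, ih, pvStepA_eq]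
      cases pvPickB d k <;> simp

theorem filterMap_pickB_eq (d : PySem.Dict String String) (l : List String) :
    l.filterMap (pvPickB d) =
      (l.filterMap (fun k => (pvPickB d k).map (fun s => (k, s)))).map Prod.snd := by
  induction l with
  | nil => rfl
  | cons k rest ih =>
      simp only [List.filterMap_cons]
      cases pvPickB d k <;> simp [ih]

theorem pvLast_eq (d : PySem.Dict String String) : pvLastA d = pvLastB d := by
  unfold pvLastA pvLastB
  rw [foldl_stepA_eq, filterMap_pickB_eq]
  set l := PySem.List.sorted d.keys (fun x => PySem.Str.lower x) false with hl
  cases hf : l.filterMap (fun k => (pvPickB d k).map (fun s => (k, s))) with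
  | nil => simp
  | cons a t =>
      cases t with
      | nil => simp
      | cons b t' => simp

-- ===== VERDICT (by name: the statement is the Claim_ definition above) =====
theorem row_team_names_pair_spec : Claim_equal_row_team_names_pair := by
  intro row _
  unfold Spec_row_team_names_pair row_team_names_pair row_team_names_pair_alt
  rw [pvScanB_spec]
  cases pvFindBoth (PySem.Dict.ofList row) pvKeyPairs with
  | some p => rfl
  | none =>
      cases pvFindEither (PySem.Dict.ofList row) pvKeyPairs with
      | some p => rfl
      | none => exact pvLast_eq _
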